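-- pv_equiv track=rewrite | github.com/gowthamddy/Cross-model-Spatial-Intelligence | Analysis/Videos_frames.py | get_labels_from_video
-- ===== SOURCE A (Python) =====
-- def get_labels_from_video(no_frames, safe_duration_list):
--
--     labels = [0]*no_frames
--     no_safe_durations = int(len(safe_duration_list)/2)
--     if(no_safe_durations == 0):
--         return labels,-1
--     else:
--
--         for i in range(no_safe_durations):
--             safe_start = max(safe_duration_list[i*2] - 1, 0)
--             safe_end = min(safe_duration_list[i*2 +1] - 1, no_frames-1)
--             labels[safe_start:safe_end+1] = [1]*(safe_end-safe_start+1) # marking the value b/w safe_start and safe_end with 1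
--
--     if len(labels) > no_frames:
--         raise Exception('Check the labels assigned in CSV file!')
--     return labels,1
-- ===== SOURCE B (Python) =====
-- def get_labels_from_video(no_frames, safe_duration_list):
--     labels = [0] * no_frames
--     no_safe_durations = len(safe_duration_list) // 2
--     if no_safe_durations == 0:
--         return labels, -1
--     n = len(labels)
--     diff = [0] * (n + 1)
--     for i in range(no_safe_durations):
--         s = max(safe_duration_list[2 * i] - 1, 0)
--         e = min(safe_duration_list[2 * i + 1] - 1, n - 1)
--         if s <= e:
--             diff[s] += 1
--             diff[e + 1] -= 1
--     run = 0
--     for j in range(n):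
--         run += diff[j]
--         labels[j] = 1 if run > 0 else 0
--     return labels, 1
-- ===== Notes on version B (the rewrite author's own statement) =====
-- stated objective: alternative
-- what changed: Replaces A's per-interval list slice assignments (rewriting up to n cells per interval) by a difference array (+1 at each interval start, -1 after each end) followed by a single prefix-sum pass over the frames (O(n+k) work instead of O(n*k), though a timing run could not verify this on its input family).
-- outside the precondition, e.g. on get_labels_from_video(5, [-5, -2]): A returns ([0, 0], 1), B returns ([0, 0, 0, 0, 0], 1); on get_labels_from_video(-1, [1, 2]): A raises Exception, B returns ([], 1)
import Mathlib
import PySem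

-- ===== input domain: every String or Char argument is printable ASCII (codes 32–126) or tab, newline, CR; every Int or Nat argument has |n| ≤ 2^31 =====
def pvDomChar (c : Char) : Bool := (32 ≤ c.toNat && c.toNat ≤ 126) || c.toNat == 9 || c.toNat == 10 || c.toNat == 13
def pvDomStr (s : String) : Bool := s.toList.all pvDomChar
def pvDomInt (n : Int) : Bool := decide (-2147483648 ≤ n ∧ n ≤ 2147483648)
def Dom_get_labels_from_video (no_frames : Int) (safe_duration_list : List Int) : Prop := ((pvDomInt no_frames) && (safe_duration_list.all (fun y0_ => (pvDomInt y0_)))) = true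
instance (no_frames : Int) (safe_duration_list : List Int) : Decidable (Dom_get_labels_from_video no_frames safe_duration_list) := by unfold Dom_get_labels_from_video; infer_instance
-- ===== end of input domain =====

-- B replaces A's per-interval slice assignments by a difference array (+1 at starts, -1 after ends) read off in one prefix-sum pass.

-- ===== PORT A =====

-- hand port of Python list slice assignment `xs[a:b] = r` (exact clamp semantics of CPython)
def pyClamp (n : Nat) (i : Int) : Nat := if i < 0 then (i + n).toNat else min i.toNat n

def pySliceAssign (xs : List Int) (a b : Int) (r : List Int) : List Int :=
  xs.take (pyClamp xs.length a) ++ r ++ xs.drop (max (pyClamp xs.length a) (pyClamp xs.length b))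

-- loop body of A's `for i in range(no_safe_durations)`
def stepA (no_frames : Int) (safe_duration_list : List Int) (labels : List Int) (i : Nat) : List Int :=
  let safe_start := max (PySem.List.pyGetD safe_duration_list ((i : Int) * 2) 0 - 1) 0
  let safe_end := min (PySem.List.pyGetD safe_duration_list ((i : Int) * 2 + 1) 0 - 1) (no_frames - 1)
  pySliceAssign labels safe_start (safe_end + 1) (List.replicate (safe_end - safe_start + 1).toNat 1)

def get_labels_from_video (no_frames : Int) (safe_duration_list : List Int) : List Int × Int :=
  let labels : List Int := List.replicate no_frames.toNat 0
  let no_safe_durations : Nat := safe_duration_list.length / 2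
  if no_safe_durations = 0 then (labels, -1)
  else
    let labels := (List.range no_safe_durations).foldl (stepA no_frames safe_duration_list) labels
    if (labels.length : Int) > no_frames then ([], 0)  -- Python raises Exception here (outside Pre_)
    else (labels, 1)

-- ===== PORT B =====

-- loop body of B's difference-array marking
def stepB (n : Nat) (safe_duration_list : List Int) (diff : List Int) (i : Nat) : List Int :=
  let s := max (PySem.List.pyGetD safe_duration_list (2 * (i : Int)) 0 - 1) 0
  let e := min (PySem.List.pyGetD safe_duration_list (2 * (i : Int) + 1) 0 - 1) ((n : Int) - 1)
  if s ≤ e then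
    let diff := diff.set s.toNat (diff.getD s.toNat 0 + 1)
    diff.set (e.toNat + 1) (diff.getD (e.toNat + 1) 0 - 1)
  else diff

-- loop body of B's prefix-sum pass (builds labels left to right, carrying the running sum)
def scanB (diff : List Int) (p : List Int × Int) (j : Nat) : List Int × Int :=
  let run := p.2 + diff.getD j 0
  (p.1 ++ [if 0 < run then (1 : Int) else 0], run)

def get_labels_from_video_alt (no_frames : Int) (safe_duration_list : List Int) : List Int × Int :=
  let labels : List Int := List.replicate no_frames.toNat 0
  let no_safe_durations : Nat := safe_duration_list.length / 2
  if no_safe_durations = 0 then (labels, -1)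
  else
    let n := labels.length
    let diff := (List.range no_safe_durations).foldl (stepB n safe_duration_list) (List.replicate (n + 1) 0)
    (((List.range n).foldl (scanB diff) ([], 0)).1, 1)

-- ===== PRECONDITION & SPEC =====

-- Pre_ excludes (a) the inputs where A raises its Exception (no_frames < 0 together with at least one full interval),
-- and (b) the inputs where A returns a value B cannot sensibly match: an interval end value e < 0 with
-- max(start-1,0) < e + no_frames makes A's slice assignment labels[s:e+1] = [] silently DELETE frames and return a
-- truncated labels list — an accident of CPython slice-assignment semantics that B (which ignores empty intervals)
-- could only reproduce by re-creating that accident.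
def Pre_get_labels_from_video (no_frames : Int) (safe_duration_list : List Int) : Prop :=
  (0 ≤ no_frames ∨ safe_duration_list.length ≤ 1) ∧
  ¬ (0 < no_frames ∧ ∃ i < safe_duration_list.length / 2,
      safe_duration_list.getD (i * 2 + 1) 0 < 0 ∧
      max (safe_duration_list.getD (i * 2) 0 - 1) 0 < safe_duration_list.getD (i * 2 + 1) 0 + no_frames)
instance (no_frames : Int) (safe_duration_list : List Int) : Decidable (Pre_get_labels_from_video no_frames safe_duration_list) := by unfold Pre_get_labels_from_video; infer_instance

def pvWitness_get_labels_from_video : Int × List Int := (3, [1, 2])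

def Spec_get_labels_from_video (no_frames : Int) (safe_duration_list : List Int) (out : List Int × Int) : Prop := out = get_labels_from_video_alt no_frames safe_duration_list
instance (no_frames : Int) (safe_duration_list : List Int) (out : List Int × Int) : Decidable (Spec_get_labels_from_video no_frames safe_duration_list out) := by unfold Spec_get_labels_from_video; infer_instance

-- ===== CLAIM (what is proved, stated in full; the proofs are below) =====
def Claim_equal_get_labels_from_video : Prop := ∀ (no_frames : Int) (safe_duration_list : List Int), Dom_get_labels_from_video no_frames safe_duration_list → Pre_get_labels_from_video no_frames safe_duration_list → Spec_get_labels_from_video no_frames safe_duration_list (get_labels_from_video no_frames safe_duration_list)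

-- ===== LEMMAS AND PROOFS =====

def pvS (l : List Int) (i : Nat) : Int := l.getD (i * 2) 0
def pvE (l : List Int) (i : Nat) : Int := l.getD (i * 2 + 1) 0
def pvSS (l : List Int) (i : Nat) : Int := max (pvS l i - 1) 0
def pvSE (N : Int) (l : List Int) (i : Nat) : Int := min (pvE l i - 1) (N - 1)
def pvP (N : Int) (l : List Int) (j i : Nat) : Bool :=
  decide (pvSS l i ≤ (j : Int) ∧ (j : Int) ≤ pvSE N l i)
def pvCnt (N : Int) (l : List Int) (m j : Nat) : Nat := (List.range m).countP (pvP N l j)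
def pvMark (N : Int) (l : List Int) (m n : Nat) : List Int :=
  (List.range n).map (fun j => if 0 < pvCnt N l m j then 1 else 0)

lemma pvMark_zero (N : Int) (l : List Int) (n : Nat) : pvMark N l 0 n = List.replicate n 0 := by
  simp [pvMark, pvCnt, List.map_const']

lemma pvCnt_succ (N : Int) (l : List Int) (m j : Nat) :
    pvCnt N l (m + 1) j = pvCnt N l m j + (if pvP N l j m then 1 else 0) := by
  unfold pvCnt
  rw [List.range_succ, List.countP_append]
  simp [List.countP_cons]

lemma stepA_eq (N : Int) (l : List Int) (labels : List Int) (i : Nat) :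
    stepA N l labels i = pySliceAssign labels (pvSS l i) (pvSE N l i + 1)
      (List.replicate (pvSE N l i - pvSS l i + 1).toNat 1) := by
  unfold stepA pvSS pvSE pvS pvE
  have h1 : ((i : Int) * 2) = ((i * 2 : Nat) : Int) := by push_cast; ring
  have h2 : ((i : Int) * 2 + 1) = ((i * 2 + 1 : Nat) : Int) := by push_cast; ring
  rw [h2, h1, PySem.List.pyGetD_natCast, PySem.List.pyGetD_natCast]

lemma pySliceAssign_nil (xs : List Int) (a b : Int)
    (h : pyClamp xs.length b ≤ pyClamp xs.length a) :
    pySliceAssign xs a b [] = xs := by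
  unfold pySliceAssign
  rw [max_eq_left h]
  simp [List.take_append_drop]

lemma stepA_noop (N : Int) (l : List Int) (i : Nat) (xs : List Int)
    (hN : 0 ≤ N) (hlen : xs.length = N.toNat)
    (hbad : ¬ pvSS l i ≤ pvSE N l i)
    (hD : pvE l i < 0 → N ≤ 0 ∨ pvE l i + N ≤ pvSS l i) :
    stepA N l xs i = xs := by
  rw [stepA_eq]
  have hrep : (pvSE N l i - pvSS l i + 1).toNat = 0 := by omega
  rw [hrep, List.replicate_zero]
  apply pySliceAssign_nil
  have hss0 : 0 ≤ pvSS l i := le_max_right _ _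
  have hseN : pvSE N l i + 1 = min (pvE l i) N := by unfold pvSE; omega
  unfold pyClamp
  rw [hlen]
  split_ifs <;> omega

lemma overwrite_map_range (f : Nat → Int) (n a b : Nat) (hab : a ≤ b) (hbn : b ≤ n) :
    ((List.range n).map f).take a ++ List.replicate (b - a) 1 ++ ((List.range n).map f).drop b
      = (List.range n).map (fun j => if a ≤ j ∧ j < b then 1 else f j) := by
  apply List.ext_getElem
  · simp; omega
  · intro j hj1 hj2
    simp only [List.length_map, List.length_range] at hj2
    simp only [List.getElem_append, List.length_append, List.length_take, List.length_map,
      List.length_range, List.length_replicate, List.getElem_take, List.getElem_map,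
      List.getElem_range, List.getElem_replicate, List.getElem_drop]
    split_ifs <;> first | omega | (exact congrArg f (by omega))

lemma stepA_good (N : Int) (l : List Int) (m : Nat) (hN : 0 ≤ N)
    (hg : pvSS l m ≤ pvSE N l m) :
    stepA N l (pvMark N l m N.toNat) m = pvMark N l (m + 1) N.toNat := by
  rw [stepA_eq]
  have hss0 : 0 ≤ pvSS l m := le_max_right _ _
  have hseN : pvSE N l m ≤ N - 1 := min_le_right _ _
  have hNn : ((N.toNat : Nat) : Int) = N := Int.toNat_of_nonneg hN
  set n := N.toNat with hn
  set a := (pvSS l m).toNat with ha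
  set b := (pvSE N l m + 1).toNat with hb
  have hab : a ≤ b := by omega
  have hbn : b ≤ n := by omega
  have hlen : (pvMark N l m n).length = n := by simp [pvMark]
  have hrep : (pvSE N l m - pvSS l m + 1).toNat = b - a := by omega
  have hca : pyClamp (pvMark N l m n).length (pvSS l m) = a := by
    unfold pyClamp; rw [hlen]; split_ifs <;> omega
  have hcb : pyClamp (pvMark N l m n).length (pvSE N l m + 1) = b := by
    unfold pyClamp; rw [hlen]; split_ifs <;> omega
  unfold pySliceAssign
  rw [hca, hcb, max_eq_right hab, hrep]
  unfold pvMark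
  rw [overwrite_map_range]
  · apply List.map_congr_left
    intro j hj
    rw [pvCnt_succ]
    have hP : pvP N l j m = decide (pvSS l m ≤ (j : Int) ∧ (j : Int) ≤ pvSE N l m) := rfl
    by_cases hc : pvSS l m ≤ (j : Int) ∧ (j : Int) ≤ pvSE N l m
    · rw [hP, decide_eq_true hc]
      have : a ≤ j ∧ j < b := by omega
      simp [this]
    · rw [hP, decide_eq_false hc]
      have : ¬ (a ≤ j ∧ j < b) := by omega
      simp [this]
  · exact hab
  · exact hbn

lemma foldA (N : Int) (l : List Int) (hN : 0 ≤ N)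
    (hD : ¬ (0 < N ∧ ∃ i < l.length / 2,
      l.getD (i * 2 + 1) 0 < 0 ∧ max (l.getD (i * 2) 0 - 1) 0 < l.getD (i * 2 + 1) 0 + N))
    (m : Nat) (hm : m ≤ l.length / 2) :
    (List.range m).foldl (stepA N l) (List.replicate N.toNat 0) = pvMark N l m N.toNat := by
  induction m with
  | zero => rw [pvMark_zero]; rfl
  | succ m ih =>
    rw [List.range_succ, List.foldl_append, ih (by omega), List.foldl_cons, List.foldl_nil]
    by_cases hg : pvSS l m ≤ pvSE N l m
    · exact stepA_good N l m hN hg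
    · have hmark : pvMark N l (m + 1) N.toNat = pvMark N l m N.toNat := by
        unfold pvMark
        apply List.map_congr_left
        intro j _
        rw [pvCnt_succ]
        have hP : pvP N l j m = false := by
          simp only [pvP, decide_eq_false_iff_not]
          intro hcc
          exact hg (le_trans hcc.1 hcc.2)
        simp [hP]
      rw [hmark]
      refine stepA_noop N l m (pvMark N l m N.toNat) hN (by simp [pvMark]) hg ?_
      intro he
      rcases (by omega : N ≤ 0 ∨ 0 < N) with h | h
      · exact Or.inl h
      · refine Or.inr ?_
        by_contra hlt
        apply hD
        refine ⟨h, m, by omega, he, ?_⟩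
        unfold pvE pvSS pvS at *
        omega

lemma sum_take_set (d : List Int) (p m : Nat) (c : Int) (hp : p < d.length) :
    ((d.set p (d.getD p 0 + c)).take m).sum = (d.take m).sum + (if p < m then c else 0) := by
  induction d generalizing p m with
  | nil => simp at hp
  | cons x xs ih =>
    cases p with
    | zero =>
      cases m with
      | zero => simp
      | succ m => simp; ring
    | succ q =>
      cases m with
      | zero => simp
      | succ m =>
        simp only [List.set_cons_succ, List.take_succ_cons, List.sum_cons, List.getD_cons_succ]
        rw [ih q m (by simpa using hp)]
        split_ifs <;> omega

lemma sum_take_succ (d : List Int) (j : Nat) :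
    (d.take (j + 1)).sum = (d.take j).sum + d.getD j 0 := by
  induction d generalizing j with
  | nil => simp [List.getD]
  | cons x xs ih =>
    cases j with
    | zero => simp
    | succ j => simp [ih, add_assoc]

lemma stepB_eq (N : Int) (l : List Int) (hN : 0 ≤ N) (diff : List Int) (i : Nat) :
    stepB N.toNat l diff i =
      if pvSS l i ≤ pvSE N l i then
        ((diff.set (pvSS l i).toNat (diff.getD (pvSS l i).toNat 0 + 1)).set
          ((pvSE N l i).toNat + 1)
          ((diff.set (pvSS l i).toNat (diff.getD (pvSS l i).toNat 0 + 1)).getD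
            ((pvSE N l i).toNat + 1) 0 - 1))
      else diff := by
  unfold stepB pvSS pvSE pvS pvE
  have h1 : (2 * (i : Int)) = ((i * 2 : Nat) : Int) := by push_cast; ring
  have h2 : (2 * (i : Int) + 1) = ((i * 2 + 1 : Nat) : Int) := by push_cast; ring
  have h3 : ((N.toNat : Nat) : Int) = N := Int.toNat_of_nonneg hN
  rw [h2, h1, PySem.List.pyGetD_natCast, PySem.List.pyGetD_natCast, h3]

lemma foldB (N : Int) (l : List Int) (hN : 0 ≤ N) (m : Nat) :
    ((List.range m).foldl (stepB N.toNat l) (List.replicate (N.toNat + 1) 0)).length = N.toNat + 1 ∧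
    ∀ j : Nat,
      (((List.range m).foldl (stepB N.toNat l) (List.replicate (N.toNat + 1) 0)).take (j + 1)).sum
        = (pvCnt N l m j : Int) := by
  induction m with
  | zero =>
    refine ⟨by simp, ?_⟩
    intro j
    simp [List.take_replicate, pvCnt]
  | succ m ih =>
    obtain ⟨ihl, ihs⟩ := ih
    rw [List.range_succ, List.foldl_append, List.foldl_cons, List.foldl_nil, stepB_eq N l hN]
    by_cases hg : pvSS l m ≤ pvSE N l m
    · rw [if_pos hg]
      have hss0 : 0 ≤ pvSS l m := le_max_right _ _
      have hseN : pvSE N l m ≤ N - 1 := min_le_right _ _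
      set D := (List.range m).foldl (stepB N.toNat l) (List.replicate (N.toNat + 1) 0) with hDdef
      set sa := (pvSS l m).toNat with hsa
      set sb := (pvSE N l m).toNat + 1 with hsb
      have hsaD : sa < D.length := by rw [ihl]; omega
      have hsbD : sb < (D.set sa (D.getD sa 0 + 1)).length := by
        rw [List.length_set, ihl]; omega
      constructor
      · rw [List.length_set, List.length_set, ihl]
      · intro j
        rw [sub_eq_add_neg, sum_take_set _ _ _ _ hsbD, sum_take_set _ _ _ _ hsaD, ihs j,
          pvCnt_succ]
        have hP : pvP N l j m = decide (pvSS l m ≤ (j : Int) ∧ (j : Int) ≤ pvSE N l m) := rfl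
        by_cases hc : pvSS l m ≤ (j : Int) ∧ (j : Int) ≤ pvSE N l m
        · rw [hP, decide_eq_true hc]
          have hA : sa < j + 1 := by omega
          have hB : ¬ sb < j + 1 := by omega
          rw [if_pos hA, if_neg hB, if_pos rfl]
          push_cast
          ring
        · rw [hP, decide_eq_false hc]
          have hor : (¬ sa < j + 1 ∧ ¬ sb < j + 1) ∨ (sa < j + 1 ∧ sb < j + 1) := by omega
          rcases hor with ⟨h1, h2⟩ | ⟨h1, h2⟩ <;>
            [rw [if_neg h1, if_neg h2, if_neg (by simp)]; rw [if_pos h1, if_pos h2, if_neg (by simp)]] <;>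
            push_cast <;> ring
    · rw [if_neg hg]
      refine ⟨ihl, ?_⟩
      intro j
      rw [ihs j, pvCnt_succ]
      have hP : pvP N l j m = false := by
        simp only [pvP, decide_eq_false_iff_not]
        intro hc
        exact hg (le_trans hc.1 hc.2)
      simp [hP]

lemma scanB_spec (diff : List Int) (n : Nat) :
    (List.range n).foldl (scanB diff) ([], 0)
      = ((List.range n).map (fun j => if 0 < (diff.take (j + 1)).sum then (1 : Int) else 0),
         (diff.take n).sum) := by
  induction n with
  | zero => simp
  | succ n ih =>
    rw [List.range_succ, List.foldl_append, List.foldl_cons, List.foldl_nil, ih]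
    unfold scanB
    rw [List.map_append]
    have h := sum_take_succ diff n
    simp [h]

-- ===== VERDICT (by name: the statement is the Claim_ definition above) =====
theorem get_labels_from_video_spec : Claim_equal_get_labels_from_video := by
  intro N l _hDom hPre
  show get_labels_from_video N l = get_labels_from_video_alt N l
  obtain ⟨hPre1, hD⟩ := hPre
  unfold get_labels_from_video get_labels_from_video_alt
  by_cases hk : l.length / 2 = 0
  · simp [hk]
  · have hN : 0 ≤ N := by
      rcases hPre1 with h | h
      · exact h
      · exfalso; omega
    have hNn : ((N.toNat : Nat) : Int) = N := Int.toNat_of_nonneg hN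
    rw [if_neg hk, if_neg hk]
    simp only [List.length_replicate]
    rw [foldA N l hN hD (l.length / 2) le_rfl]
    have hlen : (pvMark N l (l.length / 2) N.toNat).length = N.toNat := by simp [pvMark]
    rw [hlen, if_neg (by omega)]
    obtain ⟨_, hs⟩ := foldB N l hN (l.length / 2)
    rw [scanB_spec]
    refine Prod.ext ?_ rfl
    show pvMark N l (l.length / 2) N.toNat = _
    unfold pvMark
    apply List.map_congr_left
    intro j _
    rw [hs j]
    by_cases hc : 0 < pvCnt N l (l.length / 2) j
    · have hc' : (0 : Int) < (pvCnt N l (l.length / 2) j : Int) := by exact_mod_cast hc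
      rw [if_pos hc, if_pos hc']
    · have hc' : ¬ (0 : Int) < (pvCnt N l (l.length / 2) j : Int) := by exact_mod_cast hc
      rw [if_neg hc, if_neg hc']
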